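-- pv_equiv track=rewrite | github.com/KG-9991/Quant_cast_assgn | most_active_cookie.py | getMostActiveCookies
-- ===== SOURCE A (Python) =====
-- def getMostActiveCookies(fetched_cookies, date):
--
--     #Checks if the date exists in the log
--     if date not in fetched_cookies.keys():
--         return []
--     cookies_per_date = fetched_cookies[date]
--
--     #Sorting the dict as per the freq count in desc order
--     sorted_cookies = sorted(cookies_per_date.items(), key=lambda x: x[1], reverse=True)
--     max_frequency = sorted_cookies[0][1]
--
--     #Fetching all cookies who have max_freq
--     max_freq_cookies = [cookie_data[0] for cookie_data in sorted_cookies if cookie_data[1] == max_frequency]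
--     return max_freq_cookies
-- ===== SOURCE B (Python) =====
-- def getMostActiveCookies(fetched_cookies, date):
--     best = None
--     winners = []
--     for cookie, freq in fetched_cookies.get(date, {}).items():
--         if best is None or freq > best:
--             best = freq
--             winners = [cookie]
--         elif freq == best:
--             winners.append(cookie)
--     return winners
-- ===== Notes on version B (the rewrite author's own statement) =====
-- stated objective: alternative
-- what changed: Replaced A's sort-then-filter by a single pass with a running (best frequency, current winners) accumulator that resets on a new maximum and appends on ties; no sort, no separate filter pass.
import Mathlib
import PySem

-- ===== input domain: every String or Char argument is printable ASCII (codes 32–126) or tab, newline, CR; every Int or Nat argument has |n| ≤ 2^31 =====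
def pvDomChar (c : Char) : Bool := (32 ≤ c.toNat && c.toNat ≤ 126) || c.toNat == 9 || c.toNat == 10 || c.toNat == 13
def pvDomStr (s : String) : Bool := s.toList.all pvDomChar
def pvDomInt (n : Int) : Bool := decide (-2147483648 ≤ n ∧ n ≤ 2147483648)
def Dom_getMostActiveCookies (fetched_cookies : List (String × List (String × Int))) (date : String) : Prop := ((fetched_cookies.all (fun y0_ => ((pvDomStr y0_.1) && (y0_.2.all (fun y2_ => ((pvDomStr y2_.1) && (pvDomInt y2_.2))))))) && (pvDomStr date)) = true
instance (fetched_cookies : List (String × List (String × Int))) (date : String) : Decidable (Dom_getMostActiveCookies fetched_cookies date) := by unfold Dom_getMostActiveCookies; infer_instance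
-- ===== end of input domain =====

-- B replaces A's sort-then-filter by a single pass keeping (best frequency, current winners); return values proved equal.


-- ===== PORT A =====
-- 'date not in fetched_cookies.keys()' and 'fetched_cookies[date]' via the first-match dict lookup;
-- 'sorted_cookies[0]' via pyGet? (none = Python's IndexError, excluded by Pre_).
def getMostActiveCookies (fetched_cookies : List (String × List (String × Int))) (date : String) : List String :=
  match fetched_cookies.lookup date with
  | none => []
  | some cookies_per_date =>
    let sorted_cookies := PySem.List.sorted cookies_per_date (fun x => x.2) true
    match PySem.List.pyGet? sorted_cookies 0 with
    | none => []  -- Python raises IndexError here (empty dict for the date); excluded by Pre_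
    | some top =>
      let max_frequency := top.2
      (sorted_cookies.filter (fun cookie_data => cookie_data.2 == max_frequency)).map (fun cookie_data => cookie_data.1)

-- ===== PORT B =====
-- the loop body of Source B: state = (best frequency so far, winners so far)
def altStep (st : Option Int × List String) (cf : String × Int) : Option Int × List String :=
  match st.1 with
  | none => (some cf.2, [cf.1])
  | some b =>
    if b < cf.2 then (some cf.2, [cf.1])
    else if cf.2 == b then (st.1, st.2 ++ [cf.1])
    else st

def getMostActiveCookies_alt (fetched_cookies : List (String × List (String × Int))) (date : String) : List String :=
  (((fetched_cookies.lookup date).getD []).foldl altStep (none, [])).2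

-- ===== PRECONDITION & SPEC =====
-- Pre_ excludes only the inputs where A raises: the looked-up date mapping to an empty
-- cookie dict (A: IndexError on sorted_cookies[0]).
def Pre_getMostActiveCookies (fetched_cookies : List (String × List (String × Int))) (date : String) : Prop :=
  fetched_cookies.lookup date ≠ some []
instance (fetched_cookies : List (String × List (String × Int))) (date : String) : Decidable (Pre_getMostActiveCookies fetched_cookies date) := by unfold Pre_getMostActiveCookies; infer_instance
def pvWitness_getMostActiveCookies : (List (String × List (String × Int))) × String :=
  ([("2018-12-09", [("AtY0laUfhglK3lC7", 2), ("SAZuXPGUrfbcn5UA", 3)])], "2018-12-09")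

def Spec_getMostActiveCookies (fetched_cookies : List (String × List (String × Int))) (date : String) (out : List String) : Prop := out = getMostActiveCookies_alt fetched_cookies date
instance (fetched_cookies : List (String × List (String × Int))) (date : String) (out : List String) : Decidable (Spec_getMostActiveCookies fetched_cookies date out) := by unfold Spec_getMostActiveCookies; infer_instance

-- ===== CLAIM (what is proved, stated in full; the proofs are below) =====
def Claim_equal_getMostActiveCookies : Prop := ∀ (fetched_cookies : List (String × List (String × Int))) (date : String), Dom_getMostActiveCookies fetched_cookies date → Pre_getMostActiveCookies fetched_cookies date → Spec_getMostActiveCookies fetched_cookies date (getMostActiveCookies fetched_cookies date)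

-- ===== LEMMAS AND PROOFS =====

-- insertBy inserts x at a single position: the result is acc split around x.
theorem insertBy_eq_append {α : Type} (b : α → α → Bool) (x : α) (acc : List α) :
    ∃ l1 l2, acc = l1 ++ l2 ∧ PySem.List.insertBy b x acc = l1 ++ x :: l2 := by
  induction acc with
  | nil => exact ⟨[], [], rfl, rfl⟩
  | cons y ys ih =>
    rcases ih with ⟨l1, l2, h1, h2⟩
    by_cases hb : b x y = true
    · exact ⟨[], y :: ys, rfl, by simp [PySem.List.insertBy, hb]⟩
    · exact ⟨y :: l1, l2, by simp [h1], by simp [PySem.List.insertBy, hb, h2]⟩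

-- Filtering by a non-satisfied element commutes away the insertion.
theorem filter_insertBy_not {α : Type} (P : α → Bool) (b : α → α → Bool) (x : α) (acc : List α)
    (hx : P x = false) :
    (PySem.List.insertBy b x acc).filter P = acc.filter P := by
  rcases insertBy_eq_append b x acc with ⟨l1, l2, h1, h2⟩
  rw [h2, h1]
  simp [List.filter_append, hx]

-- Inserting a maximal element into a descending list with all keys ≤ its key appends it to the filter.
theorem filter_insertBy_max {α κ : Type} [LinearOrder κ] (key : α → κ) (x : α) (acc : List α)
    (hpw : acc.Pairwise (fun a b => key b ≤ key a)) (hle : ∀ y ∈ acc, key y ≤ key x) :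
    (PySem.List.insertBy (fun a b => decide (key b < key a)) x acc).filter (fun z => key z == key x)
      = acc.filter (fun z => key z == key x) ++ [x] := by
  induction acc with
  | nil => simp [PySem.List.insertBy]
  | cons y ys ih =>
    rcases List.pairwise_cons.mp hpw with ⟨hy, hpw'⟩
    by_cases hlt : key y < key x
    · have hfy : ((y :: ys).filter (fun z => key z == key x)) = [] := by
        rw [List.filter_eq_nil_iff]
        intro z hz
        rcases List.mem_cons.mp hz with rfl | hz'
        · simp [ne_of_lt hlt]
        · simp [ne_of_lt (lt_of_le_of_lt (hy z hz') hlt)]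
      have hstep : PySem.List.insertBy (fun a b => decide (key b < key a)) x (y :: ys) = x :: y :: ys := by
        simp [PySem.List.insertBy, hlt]
      rw [hstep, List.filter_cons, hfy]
      simp
    · have hye : key y = key x := le_antisymm (hle y (by simp)) (le_of_not_gt hlt)
      have := ih hpw' (fun z hz => hle z (List.mem_cons_of_mem y hz))
      simp [PySem.List.insertBy, hye, this]

-- filtering the maximum out of the (reverse-)stable sort = filtering the original list.
theorem filter_sorted_max {α κ : Type} [LinearOrder κ] (key : α → κ) (m : κ) (xs : List α)
    (hle : ∀ y ∈ xs, key y ≤ m) :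
    (PySem.List.sorted xs key true).filter (fun z => key z == m)
      = xs.filter (fun z => key z == m) := by
  induction xs using List.reverseRecOn with
  | nil => simp [PySem.List.sorted]
  | append_singleton p x ih =>
    have hsplit : PySem.List.sorted (p ++ [x]) key true
        = PySem.List.insertBy (fun a b => decide (key b < key a)) x (PySem.List.sorted p key true) := by
      rw [PySem.List.sorted_rev_eq_foldl_insertBy, PySem.List.sorted_rev_eq_foldl_insertBy]
      simp [List.foldl_append]
    have hlep : ∀ y ∈ p, key y ≤ m := fun y hy => hle y (by simp [hy])
    have hpw := PySem.List.sorted_pairwise_rev p key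
    by_cases hx : key x = m
    · have hle' : ∀ y ∈ PySem.List.sorted p key true, key y ≤ key x := by
        intro y hy
        rw [PySem.List.mem_sorted] at hy
        rw [hx]; exact hlep y hy
      rw [hsplit]
      have := filter_insertBy_max key x (PySem.List.sorted p key true) hpw hle'
      rw [hx] at this
      rw [this, ih hlep, List.filter_append, List.filter_cons]
      simp [hx]
    · rw [hsplit, filter_insertBy_not _ _ _ _ (by simp [hx]), ih hlep,
        List.filter_append, List.filter_cons]
      simp [hx]

-- B-side: elementary facts about foldl max.
theorem le_foldl_max (l : List Int) : ∀ b : Int, b ≤ List.foldl max b l := by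
  induction l with
  | nil => intro b; simp
  | cons x t ih => intro b; exact le_trans (le_max_left b x) (ih (max b x))

theorem mem_le_foldl_max (l : List Int) : ∀ (b v : Int), v ∈ l → v ≤ List.foldl max b l := by
  induction l with
  | nil => intro _ _ h; cases h
  | cons x t ih =>
    intro b v hv
    rcases List.mem_cons.mp hv with rfl | hv'
    · exact le_trans (le_max_right b v) (le_foldl_max t (max b v))
    · exact ih (max b x) v hv'

theorem foldl_max_mem (l : List Int) : ∀ b : Int, List.foldl max b l = b ∨ List.foldl max b l ∈ l := by
  induction l with
  | nil => intro b; simp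
  | cons x t ih =>
    intro b
    rcases ih (max b x) with h | h
    · rcases max_choice b x with hm | hm
      · left; simpa [hm] using h
      · right; simp [List.foldl_cons] at h ⊢; left; rw [h, hm]
    · right; exact List.mem_cons_of_mem x h

-- The single-pass invariant: from state (some b, ws) the fold computes the running max m
-- and the winners = (ws if no reset happened, i.e. m = b) followed by the names with frequency m.
theorem altStep_foldl (xs : List (String × Int)) : ∀ (b : Int) (ws : List String),
    xs.foldl altStep (some b, ws) =
      (some (List.foldl max b (xs.map Prod.snd)),
       (if List.foldl max b (xs.map Prod.snd) = b then ws else []) ++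
         (xs.filter (fun y => y.2 == List.foldl max b (xs.map Prod.snd))).map Prod.fst) := by
  induction xs with
  | nil => intro b ws; simp
  | cons y t ih =>
    intro b ws
    rcases lt_trichotomy b y.2 with hlt | heq | hgt
    · -- reset: new best y.2
      have hstep : altStep (some b, ws) y = (some y.2, [y.1]) := by
        simp [altStep, hlt]
      have hmax : max b y.2 = y.2 := max_eq_right (le_of_lt hlt)
      have hMb : ¬ (List.foldl max b ((y :: t).map Prod.snd) = b) := by
        simp only [List.map_cons, List.foldl_cons, hmax]
        intro h
        have := le_foldl_max (t.map Prod.snd) y.2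
        omega
      simp only [List.foldl_cons, hstep, ih y.2 [y.1]]
      simp only [List.map_cons, List.foldl_cons, hmax]
      by_cases hMy : List.foldl max y.2 (t.map Prod.snd) = y.2
      · simp only [List.map_cons, List.foldl_cons, hmax] at hMb
        simp [hMy, ne_of_gt hlt]
      · simp only [List.map_cons, List.foldl_cons, hmax] at hMb
        simp [hMy, hMb, Ne.symm hMy]
    · -- tie with current best
      subst heq
      have hstep : altStep (some y.2, ws) y = (some y.2, ws ++ [y.1]) := by
        simp [altStep]
      have hmax : max y.2 y.2 = y.2 := max_self y.2
      simp only [List.foldl_cons, hstep, ih y.2 (ws ++ [y.1])]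
      simp only [List.map_cons, List.foldl_cons, hmax]
      by_cases hM : List.foldl max y.2 (t.map Prod.snd) = y.2
      · simp [hM]
      · simp [hM, Ne.symm hM]
    · -- smaller: state unchanged
      have hstep : altStep (some b, ws) y = (some b, ws) := by
        have h1 : ¬ b < y.2 := not_lt.mpr (le_of_lt hgt)
        have h2 : (y.2 == b) = false := by simp [ne_of_lt hgt]
        simp [altStep, h1, h2]
      have hmax : max b y.2 = b := max_eq_left (le_of_lt hgt)
      have hy : ¬ (y.2 = List.foldl max b (t.map Prod.snd)) := by
        have := le_foldl_max (t.map Prod.snd) b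
        omega
      simp only [List.foldl_cons, hstep, ih b ws]
      simp only [List.map_cons, List.foldl_cons, hmax]
      simp [hy]

-- ===== VERDICT (by name: the statement is the Claim_ definition above) =====
theorem getMostActiveCookies_spec : Claim_equal_getMostActiveCookies := by
  intro fc date _ hpre
  unfold Spec_getMostActiveCookies getMostActiveCookies getMostActiveCookies_alt
  cases hget : fc.lookup date with
  | none => rfl
  | some counts =>
    simp only [Option.getD_some]
    have hne : counts ≠ [] := by
      intro h; exact hpre (by rw [hget, h])
    cases hs : PySem.List.sorted counts (fun x => x.2) true with
    | nil => exact absurd ((PySem.List.sorted_eq_nil_iff counts (fun x => x.2) true).mp hs) hne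
    | cons top t =>
      have htople : ∀ y ∈ counts, y.2 ≤ top.2 :=
        PySem.List.key_head_sorted_rev_ge counts (fun x => x.2) hs
      have htopmem : top ∈ counts := by
        rw [← PySem.List.mem_sorted counts (fun x => x.2) true, hs]; simp
      -- A's side: filter over the sort = filter over counts by top.2
      have hfilter := filter_sorted_max (fun x : String × Int => x.2) top.2 counts htople
      rw [hs] at hfilter
      have hg : PySem.List.pyGet? (top :: t) 0 = some top := by
        simp [PySem.List.pyGet?, PySem.List.pyIdx?]
      rw [hg]
      simp only []
      -- B's side: unfold the fold via the invariant
      obtain ⟨c, rest, rfl⟩ : ∃ c rest, counts = c :: rest := by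
        cases counts with
        | nil => exact absurd rfl hne
        | cons c rest => exact ⟨c, rest, rfl⟩
      have hM : List.foldl max c.2 (rest.map Prod.snd) = top.2 := by
        apply le_antisymm
        · rcases foldl_max_mem (rest.map Prod.snd) c.2 with h | h
          · rw [h]; exact htople c (by simp)
          · rcases List.mem_map.mp h with ⟨y, hy, hyv⟩
            rw [← hyv]; exact htople y (List.mem_cons_of_mem c hy)
        · rcases List.mem_cons.mp htopmem with rfl | h
          · exact le_foldl_max (rest.map Prod.snd) top.2
          · exact mem_le_foldl_max (rest.map Prod.snd) c.2 top.2 (List.mem_map.mpr ⟨top, h, rfl⟩)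
      have hstep0 : altStep (none, []) c = (some c.2, [c.1]) := by simp [altStep]
      have hfilter' : List.filter (fun cookie_data : String × Int => cookie_data.2 == top.2) (top :: t)
          = List.filter (fun cookie_data : String × Int => cookie_data.2 == top.2) (c :: rest) := hfilter
      rw [List.foldl_cons, hstep0, altStep_foldl rest c.2 [c.1], hM, hfilter']
      by_cases hc : top.2 = c.2
      · have hb : (c.2 == top.2) = true := by simp [hc.symm]
        simp [hc]
      · have hb : (c.2 == top.2) = false := by
          simp only [beq_eq_false_iff_ne, ne_eq]
          exact fun h => hc h.symm
        simp [hb, hc]
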